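-- pv_equiv track=rewrite | github.com/danabrosh/python-assignments | day05/extended_dna_sequencing.py | find_dna_sequences
-- ===== SOURCE A (Python) =====
-- def find_dna_sequences(sequence):
--     # First split by all non-ACTG characters
--     seq_list = []
--     current = ""
--
--     for char in sequence:
--         if char in 'ACTG':
--             current += char
--         else:
--             if current:
--                 seq_list.append(current)
--                 current = ""
--
--     # Don't forget the last sequence
--     if current:
--         seq_list.append(current)
--
--     # Sort by length in descending order
--     return sorted(seq_list, key=len, reverse=True)
-- ===== SOURCE B (Python) =====
-- def find_dna_sequences(sequence):
--     # Blank out every non-ACTG character, let str.split() extract the runs,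
--     # then sort by length descending (stable, same tie order as A).
--     cleaned = ''.join(c if c in 'ACTG' else ' ' for c in sequence)
--     return sorted(cleaned.split(), key=len, reverse=True)
-- ===== Notes on version B (the rewrite author's own statement) =====
-- stated objective: idiomatic
-- what changed: Replaces the char-by-char accumulator loop with buffer flushes by a whitespace-masking map followed by str.split(), which does the run extraction; the final sort is unchanged.
import Mathlib
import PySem

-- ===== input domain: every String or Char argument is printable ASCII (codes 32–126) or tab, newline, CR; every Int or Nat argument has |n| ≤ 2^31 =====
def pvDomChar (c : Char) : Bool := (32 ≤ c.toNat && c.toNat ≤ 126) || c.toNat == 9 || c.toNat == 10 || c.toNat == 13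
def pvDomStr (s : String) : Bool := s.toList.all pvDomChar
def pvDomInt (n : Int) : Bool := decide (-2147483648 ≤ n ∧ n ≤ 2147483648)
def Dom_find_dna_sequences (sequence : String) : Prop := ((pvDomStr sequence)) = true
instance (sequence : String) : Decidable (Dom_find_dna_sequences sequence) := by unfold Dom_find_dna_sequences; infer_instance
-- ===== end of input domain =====

-- B replaces A's accumulator loop (buffer + flush) by masking every non-ACTG character to a blank
-- and letting str.split() extract the runs; objective: idiomatic, same cost.

-- shared char-class test: Python's `ch in 'ACTG'`
def pvIsACTG (ch : Char) : Bool := ['A', 'C', 'T', 'G'].contains ch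

-- ===== PORT A =====
-- A's `current` (a str) is carried as List Char (Lean's own String ops are kernel-opaque);
-- a flushed piece becomes a String via String.ofList.
def pvStepA (st : List String × List Char) (ch : Char) : List String × List Char :=
  if pvIsACTG ch then (st.1, st.2 ++ [ch])               -- current += char
  else if st.2.isEmpty then st                            -- if current: (false) — do nothing
  else (st.1 ++ [String.ofList st.2], [])                 -- seq_list.append(current); current = ""

def find_dna_sequences (sequence : String) : List String :=
  let st := sequence.toList.foldl pvStepA ([], [])
  let seq_list := if st.2.isEmpty then st.1 else st.1 ++ [String.ofList st.2]
  PySem.List.sorted seq_list (fun t => PySem.Str.len t) true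

-- ===== PORT B =====
def find_dna_sequences_alt (sequence : String) : List String :=
  -- cleaned = ''.join(c if c in 'ACTG' else ' ' for c in sequence)
  let cleaned := sequence.toList.map (fun c => if pvIsACTG c then c else ' ')
  -- cleaned.split()  (PySem.Chars.split₀ is str.split() on the char list), then the sort
  PySem.List.sorted ((PySem.Chars.split₀ cleaned).map String.ofList) (fun t => PySem.Str.len t) true

-- ===== PRECONDITION & SPEC =====
def Spec_find_dna_sequences (sequence : String) (out : List String) : Prop := out = find_dna_sequences_alt sequence
instance (sequence : String) (out : List String) : Decidable (Spec_find_dna_sequences sequence out) := by unfold Spec_find_dna_sequences; infer_instance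

-- ===== CLAIM (what is proved, stated in full; the proofs are below) =====
def Claim_equal_find_dna_sequences : Prop := ∀ (sequence : String), Dom_find_dna_sequences sequence → Spec_find_dna_sequences sequence (find_dna_sequences sequence)

-- ===== LEMMAS AND PROOFS =====

-- the common tokenization both programs compute: maximal ACTG runs, in order
def pvToks : List Char → List Char → List (List Char)
  | cur, [] => if cur.isEmpty then [] else [cur]
  | cur, c :: rest =>
      if pvIsACTG c then pvToks (cur ++ [c]) rest
      else if cur.isEmpty then pvToks [] rest
      else cur :: pvToks [] rest

lemma pvACTG_not_space (c : Char) (h : pvIsACTG c = true) : PySem.Chars.isspace c = false := by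
  simp [pvIsACTG] at h
  rcases h with h | h | h | h <;> subst h <;> decide

-- A's loop, flushed, yields the tokenization
lemma pvA_loop (l : List Char) : ∀ (acc : List String) (cur : List Char),
    (if (l.foldl pvStepA (acc, cur)).2.isEmpty then (l.foldl pvStepA (acc, cur)).1
     else (l.foldl pvStepA (acc, cur)).1 ++ [String.ofList (l.foldl pvStepA (acc, cur)).2])
    = acc ++ (pvToks cur l).map String.ofList := by
  induction l with
  | nil =>
      intro acc cur
      by_cases h : cur.isEmpty <;> simp [pvToks, h]
  | cons c rest ih =>
      intro acc cur
      by_cases hp : pvIsACTG c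
      · simp only [List.foldl_cons, pvStepA, hp, if_true, pvToks, ih]
      · by_cases hc : cur.isEmpty
        · have hcur : cur = [] := by simpa [List.isEmpty_iff] using hc
          subst hcur
          rw [List.foldl_cons, show pvStepA (acc, []) c = (acc, []) by simp [pvStepA, hp], ih]
          simp [pvToks, hp]
        · rw [List.foldl_cons,
            show pvStepA (acc, cur) c = (acc ++ [String.ofList cur], []) by simp [pvStepA, hp, hc],
            ih]
          simp [pvToks, hp, hc]

-- split₀.go on the masked list yields the tokenization
lemma pvB_go (l : List Char) : ∀ (cur : List Char) (acc : List (List Char)),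
    PySem.Chars.split₀.go (l.map (fun c => if pvIsACTG c then c else ' ')) cur acc
    = acc.reverse ++ pvToks cur.reverse l := by
  induction l with
  | nil =>
      intro cur acc
      by_cases h : cur.isEmpty
      · simp [PySem.Chars.split₀.go, pvToks, h]
      · have h' : cur.reverse.isEmpty = false := by
          simp_all [List.isEmpty_iff]
        simp [PySem.Chars.split₀.go, pvToks, h, h']
  | cons c rest ih =>
      intro cur acc
      by_cases hp : pvIsACTG c
      · have hs := pvACTG_not_space c hp
        simp only [List.map_cons, hp, if_true, PySem.Chars.split₀.go, hs, Bool.false_eq_true,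
          if_false, ih, pvToks, List.reverse_cons]
      · have hsp : PySem.Chars.isspace ' ' = true := by decide
        by_cases hc : cur.isEmpty
        · have hcur : cur = [] := by simpa [List.isEmpty_iff] using hc
          subst hcur
          simp [PySem.Chars.split₀.go, hp, hsp, ih, pvToks]
        · have hc' : cur.reverse.isEmpty = false := by
            simp_all [List.isEmpty_iff]
          simp only [List.map_cons, hp, if_false, PySem.Chars.split₀.go, hsp, if_true, hc,
            Bool.false_eq_true, ih, pvToks, hc', List.reverse_cons, List.reverse_nil]
          simp

-- ===== VERDICT (by name: the statement is the Claim_ definition above) =====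
theorem find_dna_sequences_spec : Claim_equal_find_dna_sequences := by
  unfold Claim_equal_find_dna_sequences
  intro s _
  unfold Spec_find_dna_sequences find_dna_sequences find_dna_sequences_alt
  have hA := pvA_loop s.toList [] []
  have hB := pvB_go s.toList [] []
  simp only [List.reverse_nil, List.nil_append] at hA hB
  simp only [PySem.Chars.split₀, hB]
  simp only [hA]
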